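-- pv_equiv track=rewrite | github.com/Ratthapoom681/middleware | security-middleware/app/core/pipeline/identity.py | _normalized_csv
-- ===== SOURCE A (Python) =====
-- from typing import Any
--
-- def _normalized_text(value: Any) -> str:
--     """Normalize a string token for stable identity composition."""
--     if value is None:
--         return ""
--     return str(value).strip().lower()
--
-- def _normalized_csv(values: list[str]) -> str:
--     """Normalize and sort list values for deterministic identity keys."""
--     normalized = sorted({
--         normalized_value
--         for value in values
--         for normalized_value in [_normalized_text(value)]
--         if normalized_value
--     })
--     return ",".join(normalized)
-- ===== SOURCE B (Python) =====
-- def _normalized_text(value):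
--     """Normalize a string token for stable identity composition."""
--     if value is None:
--         return ""
--     return str(value).strip().lower()
--
-- def _normalized_csv(values):
--     """Sort the normalized non-empty tokens (duplicates kept), then drop
--     adjacent duplicates in one pass; no set is used."""
--     toks = sorted(t for t in map(_normalized_text, values) if t)
--     out = []
--     for t in toks:
--         if not out or out[-1] != t:
--             out.append(t)
--     return ",".join(out)
-- ===== Notes on version B (the rewrite author's own statement) =====
-- stated objective: alternative
-- what changed: B keeps duplicates, sorts the filtered normalized tokens and removes adjacent duplicates in a single post-sort pass, instead of A's set-comprehension dedup before sorting.
import Mathlib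
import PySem

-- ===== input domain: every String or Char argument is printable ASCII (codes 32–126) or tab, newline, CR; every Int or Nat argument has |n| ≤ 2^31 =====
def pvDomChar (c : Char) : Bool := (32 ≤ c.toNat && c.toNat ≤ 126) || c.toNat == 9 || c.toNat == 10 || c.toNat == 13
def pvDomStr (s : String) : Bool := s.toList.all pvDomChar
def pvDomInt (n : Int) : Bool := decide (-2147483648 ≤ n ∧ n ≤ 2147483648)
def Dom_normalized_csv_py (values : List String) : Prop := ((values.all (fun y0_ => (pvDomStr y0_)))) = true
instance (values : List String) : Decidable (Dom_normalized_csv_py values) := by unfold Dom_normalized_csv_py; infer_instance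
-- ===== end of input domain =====

-- B sorts the filtered normalized tokens with duplicates kept and removes adjacent duplicates
-- in one post-sort pass, instead of A's set-comprehension dedup before sorting (alternative decomposition).


-- ===== PORT A =====
-- _normalized_text (shared helper of both Pythons; on List String input 'value is None' is never hit)
def pvNormText (v : String) : String := PySem.Str.lower (PySem.Str.strip v)

def normalized_csv_py (values : List String) : String :=
  -- set comprehension over values (normalized, kept if truthy), then sorted, then ','.join
  let normalized := PySem.List.sorted
    (PySem.Set.ofList ((values.map pvNormText).filter (fun t => t ≠ ""))) (fun x => x) false
  PySem.Str.join "," normalized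

-- ===== PORT B =====
-- the loop body: if not out or out[-1] != t: out.append(t)
def pvStep (out : List String) (t : String) : List String :=
  if out = [] ∨ out.getLast? ≠ some t then out ++ [t] else out

def normalized_csv_py_alt (values : List String) : String :=
  let toks := PySem.List.sorted ((values.map pvNormText).filter (fun t => t ≠ "")) (fun x => x) false
  PySem.Str.join "," (toks.foldl pvStep [])

-- ===== PRECONDITION & SPEC =====
def Spec_normalized_csv_py (values : List String) (out : String) : Prop := out = normalized_csv_py_alt values
instance (values : List String) (out : String) : Decidable (Spec_normalized_csv_py values out) := by unfold Spec_normalized_csv_py; infer_instance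

-- ===== CLAIM (what is proved, stated in full; the proofs are below) =====
def Claim_equal_normalized_csv_py : Prop := ∀ (values : List String), Dom_normalized_csv_py values → Spec_normalized_csv_py values (normalized_csv_py values)

-- ===== LEMMAS AND PROOFS =====

-- any member of a ≤-sorted list is ≤ its last element
lemma pv_le_getLast? {l : List String} {x y : String}
    (hp : l.Pairwise (· ≤ ·)) (hx : x ∈ l) (hy : l.getLast? = some y) : x ≤ y := by
  induction l with
  | nil => cases hx
  | cons a rest ih =>
    cases rest with
    | nil =>
      simp at hx hy; simp [hx, hy]
    | cons b rest' =>
      rw [List.getLast?_cons_cons] at hy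
      rcases List.mem_cons.mp hx with rfl | hx'
      · have hb : y ∈ b :: rest' := List.mem_of_getLast? hy
        exact (List.pairwise_cons.mp hp).1 y hb
      · exact ih (List.pairwise_cons.mp hp).2 hx' hy

-- the adjacent-dedup loop: on a ≤-sorted input, starting from a <-sorted accumulator
-- every element of which is ≤ every token, the result is <-sorted and holds exactly
-- the elements of the accumulator and the tokens.
lemma pvLoop_spec (toks : List String) :
    ∀ out : List String, out.Pairwise (· < ·) → toks.Pairwise (· ≤ ·) →
    (∀ x ∈ out, ∀ t ∈ toks, x ≤ t) →
    (toks.foldl pvStep out).Pairwise (· < ·) ∧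
    (∀ x, x ∈ toks.foldl pvStep out ↔ x ∈ out ∨ x ∈ toks) := by
  induction toks with
  | nil => intro out h _ _; exact ⟨h, fun x => by simp⟩
  | cons t rest ih =>
    intro out hout htoks hcross
    have hrest := (List.pairwise_cons.mp htoks).2
    have htle : ∀ r ∈ rest, t ≤ r := (List.pairwise_cons.mp htoks).1
    simp only [List.foldl_cons]
    by_cases hc : out = [] ∨ out.getLast? ≠ some t
    · -- append t
      have hstep : pvStep out t = out ++ [t] := by simp [pvStep, hc]
      rw [hstep]
      have hlt : ∀ x ∈ out, x < t := by
        intro x hx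
        have hne : out ≠ [] := by rintro rfl; cases hx
        obtain ⟨y, hy⟩ := List.getLast?_isSome.mpr hne |> Option.isSome_iff_exists.mp
        have hxy : x ≤ y := pv_le_getLast? (hout.imp le_of_lt) hx hy
        have hyt : y ≤ t := hcross y (List.mem_of_getLast? hy) t (List.mem_cons_self ..)
        have hynet : y ≠ t := by
          rcases hc with h0 | h0
          · exact absurd h0 hne
          · intro he; exact h0 (he ▸ hy)
        exact lt_of_le_of_lt hxy (lt_of_le_of_ne hyt hynet)
      have hout' : (out ++ [t]).Pairwise (· < ·) := by
        rw [List.pairwise_append]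
        exact ⟨hout, List.pairwise_singleton _ _, fun x hx y hy => by
          rw [List.mem_singleton] at hy; exact hy ▸ hlt x hx⟩
      have hcross' : ∀ x ∈ out ++ [t], ∀ r ∈ rest, x ≤ r := by
        intro x hx r hr
        rcases List.mem_append.mp hx with hx' | hx'
        · exact hcross x hx' r (List.mem_cons_of_mem _ hr)
        · rw [List.mem_singleton] at hx'; exact hx' ▸ htle r hr
      obtain ⟨h1, h2⟩ := ih (out ++ [t]) hout' hrest hcross'
      refine ⟨h1, fun x => ?_⟩
      rw [h2 x]; simp only [List.mem_append, List.mem_cons]; tauto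
    · -- skip: t already last of out
      have hstep : pvStep out t = out := by simp [pvStep, hc]
      rw [hstep]
      push Not at hc
      have htmem : t ∈ out := List.mem_of_getLast? hc.2
      have hcross' : ∀ x ∈ out, ∀ r ∈ rest, x ≤ r :=
        fun x hx r hr => hcross x hx r (List.mem_cons_of_mem _ hr)
      obtain ⟨h1, h2⟩ := ih out hout hrest hcross'
      refine ⟨h1, fun x => ?_⟩
      rw [h2 x]
      constructor
      · rintro (h | h) <;> simp [h]
      · rintro (h | h)
        · exact Or.inl h
        · rcases List.mem_cons.mp h with rfl | h'
          · exact Or.inl htmem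
          · exact Or.inr h'

-- the two token lists coincide
lemma pv_lists_eq (L : List String) :
    PySem.List.sorted (PySem.Set.ofList L) (fun x => x) false =
    (PySem.List.sorted L (fun x => x) false).foldl pvStep [] := by
  set S := PySem.List.sorted L (fun x => x) false with hS
  have hSp : S.Pairwise (· ≤ ·) := PySem.List.sorted_pairwise L (fun x => x) |>.imp (fun h => h)
  obtain ⟨hlt, hmem⟩ := pvLoop_spec S [] (List.Pairwise.nil) hSp (by intro x hx; cases hx)
  apply PySem.List.sorted_eq_of_perm_of_pairwise_lt
  · apply (List.perm_ext_iff_of_nodup (hlt.imp (fun h => ne_of_lt h)) (PySem.Set.nodup_ofList L)).mpr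
    intro a
    rw [hmem a, PySem.Set.mem_ofList, hS, PySem.List.mem_sorted]
    simp
  · exact hlt

-- ===== VERDICT (by name: the statement is the Claim_ definition above) =====
theorem normalized_csv_py_spec : Claim_equal_normalized_csv_py := by
  intro values _
  unfold Spec_normalized_csv_py normalized_csv_py normalized_csv_py_alt
  rw [pv_lists_eq]
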